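-- pv_equiv track=rewrite | github.com/beppevanrolleghem/odiseectf | olivierdeschacht/final.py | altWord
-- ===== SOURCE A (Python) =====
-- alts = {"a":"@",
--         "e":"3",
--         "o":"0",
--         "s":"5",
--         "g":"9",
--         "i":"!"}
--
-- def altWord(word, l=-1):
--     t = 0
--     s = ""
--     for letter in word:
--         if letter in alts and t < l:
--             s+=alts[letter]
--         else:
--             s+=letter
--         t = t+1
--     return s
-- ===== SOURCE B (Python) =====
-- alts = {"a":"@",
--         "e":"3",
--         "o":"0",
--         "s":"5",
--         "g":"9",
--         "i":"!"}
--
-- _table = str.maketrans(alts)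
--
-- def altWord(word, l=-1):
--     n = max(l, 0)
--     return word[:n].translate(_table) + word[n:]
-- ===== Notes on version B (the rewrite author's own statement) =====
-- stated objective: idiomatic
-- what changed: Replaces the per-character loop with counter and membership test by a one-shot str.maketrans translation table applied to the prefix word[:max(l,0)], concatenated with the untouched suffix.
import Mathlib
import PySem

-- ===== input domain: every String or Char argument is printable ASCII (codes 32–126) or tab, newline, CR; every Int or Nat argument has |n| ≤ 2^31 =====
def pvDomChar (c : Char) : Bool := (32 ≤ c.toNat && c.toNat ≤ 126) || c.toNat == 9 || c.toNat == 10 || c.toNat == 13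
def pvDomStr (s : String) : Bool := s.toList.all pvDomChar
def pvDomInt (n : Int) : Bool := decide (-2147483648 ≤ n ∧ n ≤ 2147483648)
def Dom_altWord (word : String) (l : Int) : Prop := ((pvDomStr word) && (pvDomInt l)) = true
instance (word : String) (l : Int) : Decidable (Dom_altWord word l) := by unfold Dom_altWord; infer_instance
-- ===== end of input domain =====

-- B replaces A's per-character loop (counter + dict membership test) by a translation
-- table applied once to the prefix word[:max(l,0)], concatenated with the untouched
-- suffix; objective: idiomatic.

-- ===== PORT A =====
-- the module-level dict `alts` (single-character keys/values, so Char × Char)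
def pvAlts : List (Char × Char) :=
  [('a','@'), ('e','3'), ('o','0'), ('s','5'), ('g','9'), ('i','!')]

-- literal port of A's loop: t counts positions, s accumulates the output characters
def altWord (word : String) (l : Int) : String :=
  let r := word.toList.foldl
    (fun (st : Int × List Char) letter =>
      let t := st.1
      let s := st.2
      if (pvAlts.lookup letter).isSome ∧ t < l then
        (t + 1, s ++ [(pvAlts.lookup letter).getD letter])
      else
        (t + 1, s ++ [letter]))
    (0, [])
  String.ofList r.2

-- ===== PORT B =====
-- the translation table as a per-character function (str.maketrans over `alts`)
def pvTr (c : Char) : Char := (pvAlts.lookup c).getD c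

def altWord_alt (word : String) (l : Int) : String :=
  let n := (max l 0).toNat
  String.ofList ((word.toList.take n).map pvTr ++ word.toList.drop n)

-- ===== PRECONDITION & SPEC =====
def Spec_altWord (word : String) (l : Int) (out : String) : Prop := out = altWord_alt word l
instance (word : String) (l : Int) (out : String) : Decidable (Spec_altWord word l out) := by unfold Spec_altWord; infer_instance

-- ===== CLAIM (what is proved, stated in full; the proofs are below) =====
def Claim_equal_altWord : Prop := ∀ (word : String) (l : Int), Dom_altWord word l → Spec_altWord word l (altWord word l)

-- ===== LEMMAS AND PROOFS =====
theorem altWord_loop (cs : List Char) (l : Int) : ∀ (t : Int) (s : List Char),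
    cs.foldl
      (fun (st : Int × List Char) letter =>
        let tt := st.1
        let ss := st.2
        if (pvAlts.lookup letter).isSome ∧ tt < l then
          (tt + 1, ss ++ [(pvAlts.lookup letter).getD letter])
        else
          (tt + 1, ss ++ [letter]))
      (t, s)
    = (t + cs.length, s ++ (cs.take (l - t).toNat).map pvTr ++ cs.drop (l - t).toNat) := by
  induction cs with
  | nil => intro t s; simp
  | cons c rest ih =>
    intro t s
    simp only [List.foldl_cons]
    by_cases h : t < l
    · have hn : (l - t).toNat = ((l - (t + 1)).toNat) + 1 := by omega
      have step : (if (pvAlts.lookup c).isSome = true ∧ t < l then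
            (t + 1, s ++ [(pvAlts.lookup c).getD c]) else (t + 1, s ++ [c]))
          = (t + 1, s ++ [pvTr c]) := by
        unfold pvTr; cases pvAlts.lookup c <;> simp [h]
      rw [step, ih]
      simp [hn, List.take_succ_cons, List.drop_succ_cons, Prod.ext_iff]
      omega
    · have hz : (l - t).toNat = 0 := by omega
      have hz1 : (l - (t + 1)).toNat = 0 := by omega
      rw [if_neg (by simp [h]), ih]
      simp [hz, hz1]
      omega

-- ===== VERDICT (by name: the statement is the Claim_ definition above) =====
theorem altWord_spec : Claim_equal_altWord := by
  intro word l _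
  unfold Spec_altWord altWord altWord_alt
  rw [altWord_loop]
  have hmax : (l - 0).toNat = (max l 0).toNat := by omega
  rw [hmax]
  simp
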